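-- pv_equiv track=rewrite | github.com/0russwest0/android_env | android_env/wrappers/mobile_agent_action_wrapper.py | _split_words_and_newlines
-- ===== SOURCE A (Python) =====
-- from typing import Any, Dict, Iterable
--
-- def _split_words_and_newlines(text: str) -> Iterable[str]:
--   """Split lines of text into individual words and newline chars."""
--   lines = text.split('\n')
--   for i, line in enumerate(lines):
--     words = line.split(' ')
--     for j, word in enumerate(words):
--       if word:
--         yield word
--       if j < len(words) - 1:
--         yield '%s'
--     if i < len(lines) - 1:
--       yield '\n'
-- ===== SOURCE B (Python) =====
-- def _split_words_and_newlines(text: str):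
--   """Single left-to-right scan with a word buffer instead of nested splits."""
--   out = []
--   cur = []
--   for ch in text:
--     if ch == ' ':
--       if cur:
--         out.append(''.join(cur))
--         cur = []
--       out.append('%s')
--     elif ch == '\n':
--       if cur:
--         out.append(''.join(cur))
--         cur = []
--       out.append('\n')
--     else:
--       cur.append(ch)
--   if cur:
--     out.append(''.join(cur))
--   return out
-- ===== Notes on version B (the rewrite author's own statement) =====
-- stated objective: simpler
-- what changed: Replaced the nested line-then-word splitting with enumerate index tests by a single left-to-right character scan that keeps a current-word buffer and emits words and separator markers as delimiters are met.
import Mathlib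
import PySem

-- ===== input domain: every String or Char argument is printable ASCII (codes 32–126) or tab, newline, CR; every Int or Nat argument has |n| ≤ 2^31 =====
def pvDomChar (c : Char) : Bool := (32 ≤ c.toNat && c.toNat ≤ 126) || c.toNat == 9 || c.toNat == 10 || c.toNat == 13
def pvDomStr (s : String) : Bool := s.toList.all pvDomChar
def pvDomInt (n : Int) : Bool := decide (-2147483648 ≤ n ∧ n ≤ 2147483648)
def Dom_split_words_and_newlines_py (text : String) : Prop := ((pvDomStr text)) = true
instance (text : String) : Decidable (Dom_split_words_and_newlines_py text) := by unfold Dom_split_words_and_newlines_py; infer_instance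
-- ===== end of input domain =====

-- B replaces A's nested split('\n')/split(' ') + enumerate loops by one left-to-right
-- character scan with a word buffer (objective: simpler single pass; same result proved equal).

-- ===== PORT A =====
-- A: lines = text.split('\n'); for i, line in enumerate(lines): words = line.split(' ');
--    for j, word in enumerate(words): yield word if nonempty; yield '%s' if j < len(words)-1;
--    yield '\n' if i < len(lines)-1.  (yields collected into the returned list)
def split_words_and_newlines_py (text : String) : List String :=
  let lines := PySem.Chars.splitOn text.toList ['\n']
  (PySem.List.enumerate lines 0).foldl
    (fun acc p =>
      let words := PySem.Chars.splitOn p.2 [' ']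
      let acc :=
        (PySem.List.enumerate words 0).foldl
          (fun acc q =>
            let acc := if q.2.isEmpty then acc else acc ++ [String.mk q.2]
            if q.1 < (words.length : Int) - 1 then acc ++ ["%s"] else acc)
          acc
      if p.1 < (lines.length : Int) - 1 then acc ++ ["\n"] else acc)
    []

-- ===== PORT B =====
-- B: one scan over the characters; state = (output so far, current word buffer);
--    ''.join(cur) is ported as String.mk (exact: cur holds the word's chars in order).
def split_words_and_newlines_py_alt (text : String) : List String :=
  let r := text.toList.foldl
    (fun (st : List String × List Char) ch =>
      if ch = ' ' then
        ((if st.2.isEmpty then st.1 else st.1 ++ [String.mk st.2]) ++ ["%s"], [])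
      else if ch = '\n' then
        ((if st.2.isEmpty then st.1 else st.1 ++ [String.mk st.2]) ++ ["\n"], [])
      else (st.1, st.2 ++ [ch]))
    ([], [])
  if r.2.isEmpty then r.1 else r.1 ++ [String.mk r.2]

-- ===== PRECONDITION & SPEC =====
def Spec_split_words_and_newlines_py (text : String) (out : List String) : Prop := out = split_words_and_newlines_py_alt text
instance (text : String) (out : List String) : Decidable (Spec_split_words_and_newlines_py text out) := by unfold Spec_split_words_and_newlines_py; infer_instance

-- ===== CLAIM (what is proved, stated in full; the proofs are below) =====
def Claim_equal_split_words_and_newlines_py : Prop := ∀ (text : String), Dom_split_words_and_newlines_py text → Spec_split_words_and_newlines_py text (split_words_and_newlines_py text)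

-- ===== LEMMAS AND PROOFS =====

-- the word/line renderers both programs compute
def pvEmit (w : List Char) : List String := if w.isEmpty then [] else [String.mk w]
def pvLineOut (l : List Char) : List String :=
  List.intercalate ["%s"] ((l.splitOn ' ').map pvEmit)
def pvOut (cs : List Char) : List String :=
  List.intercalate ["\n"] ((cs.splitOn '\n').map pvLineOut)

-- PySem's fuel-based single-char split is List.splitOn
theorem pysplit_go_eq (c : Char) :
    ∀ (fuel : Nat) (l cur : List Char) (acc : List (List Char)), l.length < fuel →
      PySem.Chars.splitOn.go [c] fuel l cur acc
        = acc.reverse ++ List.splitOnP.go (· == c) l cur := by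
  intro fuel
  induction fuel with
  | zero => intro l cur acc h; omega
  | succ n ih =>
    intro l cur acc h
    cases l with
    | nil => simp [PySem.Chars.splitOn.go, List.splitOnP.go]
    | cons a rest =>
      simp only [PySem.Chars.splitOn.go]
      by_cases hac : a = c
      · subst hac
        have hp : List.isPrefixOf [a] (a :: rest) = true := by simp [List.isPrefixOf]
        rw [if_pos hp]
        rw [ih _ _ _ (by simpa using Nat.lt_of_succ_lt_succ h)]
        simp [List.splitOnP.go]
      · have hp : List.isPrefixOf [c] (a :: rest) = false := by
          simp [List.isPrefixOf]; exact fun hc => (hac hc.symm).elim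
        rw [if_neg (by simp [hp])]
        rw [ih _ _ _ (by simpa using Nat.lt_of_succ_lt_succ h)]
        simp only [List.splitOnP.go]
        rw [if_neg (by simp [hac])]

theorem pysplit_eq (c : Char) (s : List Char) :
    PySem.Chars.splitOn s [c] = s.splitOn c := by
  rw [PySem.Chars.splitOn, pysplit_go_eq c (s.length + 1) s [] [] (by omega)]
  rfl

theorem splitOn_ne_nil {c : Char} (s : List Char) : s.splitOn c ≠ [] :=
  List.splitOnP_ne_nil _ _

theorem intercalate_cons {α : Type} (sep : List α) (x : List α) (xs : List (List α)) :
    List.intercalate sep (x :: xs)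
      = x ++ (if xs = [] then [] else sep ++ List.intercalate sep xs) := by
  cases xs with
  | nil => simp [List.intercalate]
  | cons y ys => simp [List.intercalate, List.intersperse]

-- no-separator prefix peels off in front of a split
theorem splitOn_append_of_not_mem {c : Char} (pre : List Char) (h : c ∉ pre) :
    ∀ (l : List Char), (pre ++ l).splitOn c = ((l.splitOn c).modifyHead (pre ++ ·)) := by
  induction pre with
  | nil =>
    intro l
    rcases hs : List.splitOn c l with _ | ⟨x, xs⟩ <;> simp [hs]
  | cons a pre ih =>
    intro l
    have ha : (a == c) = false := beq_eq_false_iff_ne.mpr (fun hac => h (by simp [hac]))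
    have hpre : c ∉ pre := fun hc => h (List.mem_cons_of_mem _ hc)
    obtain ⟨h1, t1, he⟩ := List.exists_cons_of_ne_nil (splitOn_ne_nil (c := c) l)
    have hstep : ((a :: pre) ++ l).splitOn c = ((pre ++ l).splitOn c).modifyHead (a :: ·) := by
      show List.splitOnP (· == c) (a :: (pre ++ l)) = _
      rw [List.splitOnP_cons, ha]
      simp [List.splitOn]
    rw [hstep, ih hpre l, he]
    simp

-- the inner `for j, word in enumerate(words)` loop
theorem inner_loop (n : Int) :
    ∀ (ws : List (List Char)) (s : Int) (acc : List String), ws ≠ [] → s + ws.length = n →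
      (PySem.List.enumerate ws s).foldl
        (fun acc q =>
          let acc := if q.2.isEmpty then acc else acc ++ [String.mk q.2]
          if q.1 < n - 1 then acc ++ ["%s"] else acc)
        acc
      = acc ++ List.intercalate ["%s"] (ws.map pvEmit) := by
  intro ws
  induction ws with
  | nil => intro s acc h; exact absurd rfl h
  | cons w ws ih =>
    intro s acc _ hn
    rw [PySem.List.enumerate_cons]
    simp only [List.foldl_cons]
    cases ws with
    | nil =>
      have : ¬ (s < n - 1) := by simp at hn; omega
      simp only [PySem.List.enumerate_nil, List.foldl_nil, this, if_false, List.map_cons,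
        List.map_nil, intercalate_cons, pvEmit]
      by_cases hw : w.isEmpty = true <;> simp [hw]
    | cons w2 ws2 =>
      have hlt : s < n - 1 := by
        simp only [List.length_cons] at hn; push_cast at hn; omega
      rw [if_pos hlt]
      rw [ih (s + 1) _ (by simp) (by simp only [List.length_cons] at hn ⊢; push_cast at hn ⊢; omega)]
      conv_rhs => rw [List.map_cons, intercalate_cons, if_neg (by simp)]
      simp only [pvEmit]
      by_cases hw : w.isEmpty = true <;> simp [hw]

-- the outer `for i, line in enumerate(lines)` loop
theorem outer_loop (n : Int) :
    ∀ (ls : List (List Char)) (s : Int) (acc : List String), ls ≠ [] → s + ls.length = n →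
      (PySem.List.enumerate ls s).foldl
        (fun acc p =>
          let words := PySem.Chars.splitOn p.2 [' ']
          let acc :=
            (PySem.List.enumerate words 0).foldl
              (fun acc q =>
                let acc := if q.2.isEmpty then acc else acc ++ [String.mk q.2]
                if q.1 < (words.length : Int) - 1 then acc ++ ["%s"] else acc)
              acc
          if p.1 < n - 1 then acc ++ ["\n"] else acc)
        acc
      = acc ++ List.intercalate ["\n"] (ls.map pvLineOut) := by
  intro ls
  induction ls with
  | nil => intro s acc h; exact absurd rfl h
  | cons l ls ih =>
    intro s acc _ hn
    rw [PySem.List.enumerate_cons]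
    simp only [List.foldl_cons]
    have hin :
        (PySem.List.enumerate (PySem.Chars.splitOn l [' ']) 0).foldl
          (fun acc q =>
            let acc := if q.2.isEmpty then acc else acc ++ [String.mk q.2]
            if q.1 < ((PySem.Chars.splitOn l [' ']).length : Int) - 1 then acc ++ ["%s"] else acc)
          acc = acc ++ pvLineOut l := by
      rw [inner_loop ((PySem.Chars.splitOn l [' ']).length : Int) _ 0 acc
            (by rw [pysplit_eq]; exact splitOn_ne_nil l) (by omega)]
      rw [pvLineOut, pysplit_eq]
    simp only [hin]
    cases ls with
    | nil =>
      have : ¬ (s < n - 1) := by simp at hn; omega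
      simp [this, intercalate_cons]
    | cons l2 ls2 =>
      have hlt : s < n - 1 := by
        simp only [List.length_cons] at hn; push_cast at hn; omega
      rw [if_pos hlt]
      rw [ih (s + 1) _ (by simp) (by simp only [List.length_cons] at hn ⊢; push_cast at hn ⊢; omega)]
      conv_rhs => rw [List.map_cons, intercalate_cons, if_neg (by simp)]
      simp

theorem portA_eq_pvOut (text : String) : split_words_and_newlines_py text = pvOut text.toList := by
  rw [split_words_and_newlines_py]
  rw [outer_loop ((PySem.Chars.splitOn text.toList ['\n']).length : Int) _ 0 []
        (by rw [pysplit_eq]; exact splitOn_ne_nil _) (by omega)]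
  rw [pvOut, pysplit_eq]
  rfl

-- B as a structural recursion (buffer, remaining chars)
def pvScan (cur : List Char) : List Char → List String
  | [] => if cur.isEmpty then [] else [String.mk cur]
  | c :: cs =>
    if c = ' ' then (if cur.isEmpty then [] else [String.mk cur]) ++ "%s" :: pvScan [] cs
    else if c = '\n' then (if cur.isEmpty then [] else [String.mk cur]) ++ "\n" :: pvScan [] cs
    else pvScan (cur ++ [c]) cs

theorem portB_foldl_eq_scan :
    ∀ (cs : List Char) (out : List String) (cur : List Char),
      (let r := cs.foldl
          (fun (st : List String × List Char) ch =>
            if ch = ' ' then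
              ((if st.2.isEmpty then st.1 else st.1 ++ [String.mk st.2]) ++ ["%s"], [])
            else if ch = '\n' then
              ((if st.2.isEmpty then st.1 else st.1 ++ [String.mk st.2]) ++ ["\n"], [])
            else (st.1, st.2 ++ [ch]))
          (out, cur)
        if r.2.isEmpty then r.1 else r.1 ++ [String.mk r.2])
      = out ++ pvScan cur cs := by
  intro cs
  induction cs with
  | nil =>
    intro out cur
    simp only [List.foldl_nil, pvScan]
    by_cases hc : cur.isEmpty = true <;> simp [hc]
  | cons c cs ih =>
    intro out cur
    simp only [List.foldl_cons, pvScan]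
    by_cases h1 : c = ' '
    · subst h1
      rw [if_pos rfl, if_pos rfl, ih]
      by_cases hc : cur.isEmpty = true <;> simp [hc]
    · by_cases h2 : c = '\n'
      · subst h2
        rw [if_neg h1, if_pos rfl, if_neg h1, if_pos rfl, ih]
        by_cases hc : cur.isEmpty = true <;> simp [hc]
      · rw [if_neg h1, if_neg h2, if_neg h1, if_neg h2, ih]

-- the scan computes the same rendering
theorem splitOn_single (c : Char) (l : List Char) (h : c ∉ l) : l.splitOn c = [l] :=
  List.splitOnP_eq_single _ _ (fun x hx => by simp; exact fun he => h (he ▸ hx))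

theorem splitOn_first (c : Char) (xs as : List Char) (h : c ∉ xs) :
    (xs ++ c :: as).splitOn c = xs :: as.splitOn c :=
  List.splitOnP_first _ _ (fun x hx => by simp; exact fun he => h (he ▸ hx)) c (by simp) as

theorem lineOut_single (cur : List Char) (hs : ' ' ∉ cur) : pvLineOut cur = pvEmit cur := by
  rw [pvLineOut, splitOn_single ' ' cur hs]
  simp [List.intercalate]

theorem scan_eq_pvOut :
    ∀ (cs cur : List Char), ' ' ∉ cur → '\n' ∉ cur →
      pvScan cur cs = pvOut (cur ++ cs) := by
  intro cs
  induction cs with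
  | nil =>
    intro cur hs hn
    simp only [pvScan, List.append_nil, pvOut]
    rw [splitOn_single '\n' cur hn]
    simp only [List.map_cons, List.map_nil, List.intercalate, List.intersperse, List.flatten]
    rw [lineOut_single cur hs]
    simp [pvEmit]
  | cons c cs ih =>
    intro cur hs hn
    simp only [pvScan]
    by_cases h1 : c = ' '
    · subst h1
      rw [if_pos rfl, ih [] (by simp) (by simp)]
      simp only [List.nil_append, pvOut]
      rw [splitOn_append_of_not_mem cur hn (' ' :: cs)]
      have hcons : (' ' :: cs).splitOn '\n' = ((cs.splitOn '\n').modifyHead (' ' :: ·)) := by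
        simpa using splitOn_append_of_not_mem (c := '\n') [' '] (by simp) cs
      rw [hcons]
      obtain ⟨l1, ls, he⟩ := List.exists_cons_of_ne_nil (splitOn_ne_nil (c := '\n') cs)
      rw [he]
      simp only [List.modifyHead_cons, List.map_cons]
      rw [intercalate_cons, intercalate_cons]
      rw [show pvLineOut (cur ++ ' ' :: l1) = pvEmit cur ++ "%s" :: pvLineOut l1 from by
        rw [pvLineOut, pvLineOut, splitOn_first ' ' cur l1 hs, List.map_cons, intercalate_cons,
            if_neg (by simp [splitOn_ne_nil (c := ' ') l1])]
        rfl]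
      simp only [pvEmit]
      by_cases hc : cur.isEmpty = true <;> simp [hc]
    · by_cases h2 : c = '\n'
      · subst h2
        rw [if_neg (by decide), if_pos rfl, ih [] (by simp) (by simp)]
        simp only [List.nil_append, pvOut]
        rw [splitOn_first '\n' cur cs hn, List.map_cons, intercalate_cons]
        rw [lineOut_single cur hs]
        have hne : List.splitOn '\n' cs ≠ [] := splitOn_ne_nil cs
        simp only [pvEmit]
        by_cases hc : cur.isEmpty = true <;> simp [hc, hne]
      · rw [if_neg h1, if_neg h2,
            ih (cur ++ [c]) (by simp [hs]; exact fun he => h1 he.symm)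
              (by simp [hn]; exact fun he => h2 he.symm)]
        simp

theorem portB_eq_pvOut (text : String) :
    split_words_and_newlines_py_alt text = pvOut text.toList := by
  rw [split_words_and_newlines_py_alt]
  rw [portB_foldl_eq_scan text.toList [] []]
  rw [scan_eq_pvOut text.toList [] (by simp) (by simp)]
  rfl

-- ===== VERDICT (by name: the statement is the Claim_ definition above) =====
theorem split_words_and_newlines_py_spec : Claim_equal_split_words_and_newlines_py := by
  intro text _
  unfold Spec_split_words_and_newlines_py
  rw [portA_eq_pvOut, portB_eq_pvOut]
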